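-- pv_equiv track=rewrite | github.com/mittgaurav/Pietone | array_problems_3.py | magic_locs2
-- ===== SOURCE A (Python) =====
-- def magic_locs2(matrix):
--     """another way to do the same thing"""
--     result = []
--     if not matrix or not matrix[0]: return result
--
--     rows = [0] * len(matrix)
--     cols = [0] * len(matrix[0])
--
--     for i in range(len(matrix)):
--         for j in range(len(matrix[i])):
--             if matrix[i][j] == 1:
--                 rows[i] += 1
--                 cols[j] += 1
--
--     for i in range(len(matrix)):
--         for j in range(len(matrix[i])):
--             if matrix[i][j] == 1 and rows[i] == 1 and cols[j] == 1:
--                 result.append((i,j))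
--
--     return result
-- ===== SOURCE B (Python) =====
-- def magic_locs2(matrix):
--     """another way to do the same thing"""
--     return [(i, j)
--             for i, row in enumerate(matrix)
--             for j, v in enumerate(row)
--             if v == 1 and row.count(1) == 1
--             and sum(1 for r in matrix if j < len(r) and r[j] == 1) == 1]
-- ===== Notes on version B (the rewrite author's own statement) =====
-- stated objective: simpler
-- what changed: B drops A's two staged count-array passes entirely: a single comprehension over the cells tests each 1 directly by re-counting its own row (row.count(1)) and its own column (a sum over the rows), with no precomputed rows/cols arrays and no emptiness guard.
-- outside the precondition, e.g. on magic_locs2([[], [1]]): A returns [], B returns [(1, 0)]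
import Mathlib
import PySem

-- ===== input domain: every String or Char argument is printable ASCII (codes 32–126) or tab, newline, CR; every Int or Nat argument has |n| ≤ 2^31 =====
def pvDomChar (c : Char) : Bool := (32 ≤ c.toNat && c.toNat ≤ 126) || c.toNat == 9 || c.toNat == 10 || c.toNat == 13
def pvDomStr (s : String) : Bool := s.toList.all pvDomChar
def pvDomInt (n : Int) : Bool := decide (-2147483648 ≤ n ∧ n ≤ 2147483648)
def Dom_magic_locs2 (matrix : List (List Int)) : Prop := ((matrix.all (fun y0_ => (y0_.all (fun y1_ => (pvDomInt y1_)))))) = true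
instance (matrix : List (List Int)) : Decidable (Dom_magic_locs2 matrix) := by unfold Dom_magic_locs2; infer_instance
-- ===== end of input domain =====

-- B replaces A's two staged count-array passes by a single brute-force comprehension that
-- re-counts each 1's own row and column directly (simpler: no auxiliary arrays, no guard).

-- ===== PORT A =====
def magic_locs2 (matrix : List (List Int)) : List (Int × Int) :=
  if matrix = [] ∨ matrix.headD [] = [] then []
  else
    let rc := (PySem.List.pyRange 0 (PySem.List.len matrix)).foldl
      (fun (rc : List Int × List Int) i =>
        (PySem.List.pyRange 0 (PySem.List.len (PySem.List.pyGetD matrix i []))).foldl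
          (fun (rc : List Int × List Int) j =>
            if PySem.List.pyGetD (PySem.List.pyGetD matrix i []) j 0 = 1 then
              (PySem.List.pySetD rc.1 i (PySem.List.pyGetD rc.1 i 0 + 1),
               PySem.List.pySetD rc.2 j (PySem.List.pyGetD rc.2 j 0 + 1))
            else rc) rc)
      (List.replicate matrix.length (0 : Int), List.replicate (matrix.headD []).length (0 : Int))
    (PySem.List.pyRange 0 (PySem.List.len matrix)).foldl
      (fun (res : List (Int × Int)) i =>
        (PySem.List.pyRange 0 (PySem.List.len (PySem.List.pyGetD matrix i []))).foldl
          (fun (res : List (Int × Int)) j =>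
            if PySem.List.pyGetD (PySem.List.pyGetD matrix i []) j 0 = 1 ∧
               PySem.List.pyGetD rc.1 i 0 = 1 ∧ PySem.List.pyGetD rc.2 j 0 = 1
            then res ++ [(i, j)] else res) res) []

-- ===== PORT B =====
def magic_locs2_alt (matrix : List (List Int)) : List (Int × Int) :=
  (PySem.List.enumerate matrix 0).flatMap (fun r =>
    (PySem.List.enumerate r.2 0).flatMap (fun q =>
      if q.2 = 1 ∧ PySem.List.count r.2 1 = 1 ∧
         matrix.foldl (fun acc row =>
           if q.1 < PySem.List.len row ∧ PySem.List.pyGetD row q.1 0 = 1 then acc + 1 else acc)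
           (0 : Int) = 1
      then [(r.1, q.1)] else []))

-- ===== PRECONDITION & SPEC =====
-- Pre_ excludes matrices holding a 1 at a column index ≥ len(matrix[0]): with a nonempty first
-- row A raises IndexError there (cols[j] += 1); with an empty first row A's emptiness guard
-- returns an empty result while B scans the remaining rows — such ragged input is a corner on
-- which both answers are defensible.
def Pre_magic_locs2 (matrix : List (List Int)) : Prop :=
  ∀ row ∈ matrix, (1 : Int) ∉ row.drop (matrix.headD []).length
instance (matrix : List (List Int)) : Decidable (Pre_magic_locs2 matrix) := by
  unfold Pre_magic_locs2; infer_instance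
def pvWitness_magic_locs2 : List (List Int) := [[1, 0], [0, 1]]

def Spec_magic_locs2 (matrix : List (List Int)) (out : List (Int × Int)) : Prop := out = magic_locs2_alt matrix
instance (matrix : List (List Int)) (out : List (Int × Int)) : Decidable (Spec_magic_locs2 matrix out) := by unfold Spec_magic_locs2; infer_instance

-- ===== CLAIM (what is proved, stated in full; the proofs are below) =====
def Claim_equal_magic_locs2 : Prop := ∀ (matrix : List (List Int)), Dom_magic_locs2 matrix → Pre_magic_locs2 matrix → Spec_magic_locs2 matrix (magic_locs2 matrix)

-- ===== LEMMAS AND PROOFS =====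

lemma pv_setD_oob (xs : List Int) (i v : Int) (h : ¬ PySem.Raise.InRange xs.length i) :
    PySem.List.pySetD xs i v = xs := by
  have := (PySem.List.pySet?_eq_none_iff xs i v).mpr h
  simp [PySem.List.pySetD, this]

lemma pv_getD_setD (xs : List Int) (i k v : Int) (h0 : 0 ≤ i) (hl : i < (xs.length : Int))
    (hk : 0 ≤ k) :
    PySem.List.pyGetD (PySem.List.pySetD xs i v) k 0
      = if k = i then v else PySem.List.pyGetD xs k 0 := by
  rw [PySem.List.pySetD_of_nonneg _ _ h0, PySem.List.pyGetD_of_nonneg _ _ hk,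
      PySem.List.pyGetD_of_nonneg _ _ hk]
  by_cases h : k = i
  · subst h
    have hlt : k.toNat < xs.length := by omega
    simp [List.getD_eq_getElem?_getD, List.getElem?_set, hlt]
  · have hne : i.toNat ≠ k.toNat := by omega
    simp [List.getD_eq_getElem?_getD, List.getElem?_set, hne, h]

lemma pv_filter_eq_nodup (l : List Int) (i : Int) (h : l.Nodup) (hi : i ∈ l) :
    l.filter (· == i) = [i] := by
  induction l with
  | nil => cases hi
  | cons y xs ih =>
      simp only [List.nodup_cons] at h
      rcases List.mem_cons.mp hi with rfl | hmem
      · have he : xs.filter (· == i) = [] := List.filter_eq_nil_iff.mpr (by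
          intro a ha; simp only [beq_iff_eq]; rintro rfl; exact h.1 ha)
        simp [he]
      · have hne : (y == i) = false := by
          simp only [beq_eq_false_iff_ne]; rintro rfl; exact h.1 hmem
        simp [hne, ih h.2 hmem]

lemma pv_foldl_prod_ite {σ₁ σ₂ : Type} (p : Int → Prop) [DecidablePred p]
    (f : σ₁ → Int → σ₁) (g : σ₂ → Int → σ₂) :
    ∀ (l : List Int) (a : σ₁) (b : σ₂),
      l.foldl (fun s j => if p j then (f s.1 j, g s.2 j) else s) (a, b)
        = (l.foldl (fun a j => if p j then f a j else a) a,
           l.foldl (fun b j => if p j then g b j else b) b) := by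
  intro l
  induction l with
  | nil => intro a b; rfl
  | cons x xs ih => intro a b; by_cases hp : p x <;> simp [hp, ih]

lemma pv_length_foldl_setD (p : Int → Prop) [DecidablePred p] :
    ∀ (l : List Int) (c : List Int),
      (l.foldl (fun c j => if p j then PySem.List.pySetD c j (PySem.List.pyGetD c j 0 + 1) else c) c).length
        = c.length := by
  intro l
  induction l with
  | nil => intro c; rfl
  | cons x xs ih =>
      intro c
      by_cases hp : p x <;> simp [hp, ih, PySem.List.length_pySetD]

lemma pv_foldl_setD_count (p : Int → Prop) [DecidablePred p] :
    ∀ (l : List Int) (init : List Int) (k : Int), 0 ≤ k →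
      (∀ j ∈ l, p j → 0 ≤ j ∧ j < (init.length : Int)) →
      PySem.List.pyGetD
        (l.foldl (fun st j => if p j then PySem.List.pySetD st j (PySem.List.pyGetD st j 0 + 1) else st) init) k 0
        = PySem.List.pyGetD init k 0 + (l.countP (fun j => decide (p j ∧ j = k)) : Int) := by
  intro l
  induction l with
  | nil => intro init k hk _; simp
  | cons x xs ih =>
      intro init k hk hrange
      by_cases hp : p x
      · have hx := hrange x (by simp) hp
        have hlen : (PySem.List.pySetD init x (PySem.List.pyGetD init x 0 + 1)).length = init.length :=
          PySem.List.length_pySetD _ _ _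
        rw [List.foldl_cons, if_pos hp,
            ih _ k hk (by intro j hj hpj; rw [hlen]; exact hrange j (List.mem_cons_of_mem _ hj) hpj),
            pv_getD_setD _ _ _ _ hx.1 hx.2 hk]
        rw [List.countP_cons]
        by_cases hkx : k = x
        · subst hkx
          have hone : List.countP (fun j => decide (p j ∧ j = k)) (k :: xs)
              = List.countP (fun j => decide (p j ∧ j = k)) xs + 1 := by
            rw [List.countP_cons]; simp [hp]
          rw [← List.countP_cons, hone]
          push_cast
          omega
        · have hnot : ¬ (p x ∧ x = k) := by rintro ⟨_, rfl⟩; exact hkx rfl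
          simp [hkx, hnot]
      · rw [List.foldl_cons, if_neg hp, ih _ k hk
            (fun j hj hpj => hrange j (List.mem_cons_of_mem _ hj) hpj), List.countP_cons]
        have hnot : ¬ (p x ∧ x = k) := fun h => hp h.1
        simp [hnot]

lemma pv_countP_eq_of_nodup (p : Int → Prop) [DecidablePred p] (k : Int) :
    ∀ (l : List Int), l.Nodup →
      l.countP (fun j => decide (p j ∧ j = k)) = if k ∈ l ∧ p k then 1 else 0 := by
  intro l
  induction l with
  | nil => simp
  | cons x xs ih =>
      intro h
      simp only [List.nodup_cons] at h
      rw [List.countP_cons, ih h.2]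
      by_cases hkx : x = k
      · subst hkx
        have hnm : x ∉ xs := h.1
        by_cases hp : p x <;> simp [hp, hnm]
      · have hnot : ¬ (p x ∧ x = k) := by rintro ⟨_, rfl⟩; exact hkx rfl
        by_cases hk : k ∈ xs <;> simp [hnot, hkx, hk, Ne.symm hkx]

lemma pv_countP_pyRange_col (row : List Int) (k : Int) (hk : 0 ≤ k) :
    (PySem.List.pyRange 0 (PySem.List.len row)).countP
        (fun j => decide (PySem.List.pyGetD row j 0 = 1 ∧ j = k))
      = if k < PySem.List.len row ∧ PySem.List.pyGetD row k 0 = 1 then 1 else 0 := by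
  rw [pv_countP_eq_of_nodup _ k _ (PySem.List.nodup_pyRange_one 0 (PySem.List.len row))]
  simp only [PySem.List.mem_pyRange_one, PySem.List.len_eq]
  by_cases h1 : k < PySem.List.len row
  · by_cases h2 : PySem.List.pyGetD row k 0 = 1 <;>
      simp_all [PySem.List.len_eq]
  · simp_all [PySem.List.len_eq]

lemma pv_countP_pyRange_val (row : List Int) :
    (PySem.List.pyRange 0 (PySem.List.len row)).countP
        (fun j => decide (PySem.List.pyGetD row j 0 = 1))
      = PySem.List.count row 1 := by
  rw [PySem.List.count_eq]
  conv_rhs => rw [← PySem.List.map_pyGetD_pyRange_zero row 0]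
  rw [List.count, List.countP_map]
  rfl

lemma pv_foldl_bump_fixed (p : Int → Prop) [DecidablePred p] (i : Int) (h0 : 0 ≤ i) :
    ∀ (l : List Int) (a : List Int),
      l.foldl (fun a j => if p j then PySem.List.pySetD a i (PySem.List.pyGetD a i 0 + 1) else a) a
        = PySem.List.pySetD a i (PySem.List.pyGetD a i 0 + (l.countP (fun j => decide (p j)) : Int)) := by
  intro l
  induction l with
  | nil =>
      intro a
      by_cases hin : i < (a.length : Int)
      · rw [PySem.List.pySetD_of_nonneg _ _ h0, PySem.List.pyGetD_of_nonneg _ _ h0]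
        simp only [List.countP_nil, Nat.cast_zero, add_zero, List.foldl_nil]
        have hlt : i.toNat < a.length := by omega
        rw [List.getD_eq_getElem?_getD, List.getElem?_eq_getElem hlt]
        exact (List.set_getElem_self hlt).symm
      · have hoob : ¬ PySem.Raise.InRange a.length i := by
          simp [PySem.Raise.InRange]; omega
        simp [pv_setD_oob _ _ _ hoob]
  | cons x xs ih =>
      intro a
      by_cases hp : p x
      · rw [List.foldl_cons, if_pos hp, ih]
        by_cases hin : i < (a.length : Int)
        · rw [pv_getD_setD _ _ _ _ h0 hin h0, if_pos rfl]
          rw [PySem.List.pySetD_of_nonneg _ _ h0, PySem.List.pySetD_of_nonneg _ _ h0,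
              PySem.List.pySetD_of_nonneg _ _ h0, List.set_set]
          rw [List.countP_cons]
          congr 1
          simp only [hp, decide_true, if_true]
          push_cast; ring
        · have hoob : ¬ PySem.Raise.InRange a.length i := by
            simp [PySem.Raise.InRange]; omega
          rw [pv_setD_oob _ _ _ hoob, pv_setD_oob _ _ _ hoob, pv_setD_oob _ _ _ hoob]
      · rw [List.foldl_cons, if_neg hp, ih, List.countP_cons]
        simp [hp]

lemma pv_foldl_setD_add (amt : Int → Int) :
    ∀ (l : List Int) (init : List Int) (k : Int), 0 ≤ k →
      (∀ x ∈ l, 0 ≤ x ∧ x < (init.length : Int)) →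
      PySem.List.pyGetD
        (l.foldl (fun st x => PySem.List.pySetD st x (PySem.List.pyGetD st x 0 + amt x)) init) k 0
        = PySem.List.pyGetD init k 0 + ((l.filter (· == k)).map amt).sum := by
  intro l
  induction l with
  | nil => intro init k hk _; simp
  | cons x xs ih =>
      intro init k hk hrange
      have hx := hrange x (by simp)
      have hlen : (PySem.List.pySetD init x (PySem.List.pyGetD init x 0 + amt x)).length = init.length :=
        PySem.List.length_pySetD _ _ _
      rw [List.foldl_cons,
          ih _ k hk (by intro j hj; rw [hlen]; exact hrange j (List.mem_cons_of_mem _ hj)),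
          pv_getD_setD _ _ _ _ hx.1 hx.2 hk, List.filter_cons]
      by_cases hkx : k = x
      · subst hkx
        simp only [BEq.rfl, if_pos rfl, if_true, List.map_cons, List.sum_cons]
        ring
      · have : (x == k) = false := by simp [Ne.symm hkx]
        simp [hkx, this]

lemma pv_mem_drop (l : List Int) (m j : Nat) (h : j < l.length) (hm : m ≤ j) :
    l[j] ∈ l.drop m := by
  have hlen : j - m < (l.drop m).length := by simp [List.length_drop]; omega
  have he : (l.drop m)[j - m] = l[j] := by rw [List.getElem_drop]; congr 1; omega
  rw [← he]; exact List.getElem_mem _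

lemma pv_colfold_char :
    ∀ (rows : List (List Int)) (c : List Int) (k : Int), 0 ≤ k →
      (∀ row ∈ rows, (1 : Int) ∉ row.drop c.length) →
      PySem.List.pyGetD
        (rows.foldl (fun c row =>
          (PySem.List.pyRange 0 (PySem.List.len row)).foldl
            (fun c j => if PySem.List.pyGetD row j 0 = 1 then
                PySem.List.pySetD c j (PySem.List.pyGetD c j 0 + 1) else c) c) c) k 0
      = PySem.List.pyGetD c k 0
        + (rows.countP (fun row =>
            decide (k < PySem.List.len row ∧ PySem.List.pyGetD row k 0 = 1)) : Int) := by
  intro rows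
  induction rows with
  | nil => intro c k hk _; simp
  | cons r rs ih =>
      intro c k hk hpre
      have hlen := pv_length_foldl_setD (fun j => PySem.List.pyGetD r j 0 = 1)
        (PySem.List.pyRange 0 (PySem.List.len r)) c
      have hin : ∀ j ∈ PySem.List.pyRange 0 (PySem.List.len r),
          PySem.List.pyGetD r j 0 = 1 → 0 ≤ j ∧ j < (c.length : Int) := by
        intro j hj h1
        rw [PySem.List.mem_pyRange_one] at hj
        simp only [PySem.List.len_eq] at hj
        refine ⟨hj.1, ?_⟩
        by_contra hge
        have hjl : j.toNat < r.length := by omega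
        have hval : r[j.toNat] = 1 := by
          rw [PySem.List.pyGetD_eq_getElem r 0 hj.1 hj.2] at h1; exact h1
        have : (1 : Int) ∈ r.drop c.length := by
          rw [← hval]; exact pv_mem_drop r c.length j.toNat hjl (by omega)
        exact hpre r (by simp) this
      rw [List.foldl_cons, ih _ k hk (by
        intro row hrow
        rw [hlen]
        exact hpre row (List.mem_cons_of_mem _ hrow)),
        pv_foldl_setD_count _ _ c k hk hin, pv_countP_pyRange_col r k hk, List.countP_cons]
      by_cases hcond : k < PySem.List.len r ∧ PySem.List.pyGetD r k 0 = 1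
      · simp [hcond]; push_cast; omega
      · simp [hcond]; push_cast; omega

lemma pv_filter_map_eq_flatMap {α β : Type} (l : List α) (p : α → Bool) (f : α → β) :
    (l.filter p).map f = l.flatMap (fun x => if p x then [f x] else []) := by
  induction l with
  | nil => simp
  | cons x xs ih => by_cases h : p x <;> simp [h, ih]

theorem pv_main (matrix : List (List Int))
    (hpre : ∀ row ∈ matrix, (1 : Int) ∉ row.drop (matrix.headD []).length) :
    magic_locs2 matrix = magic_locs2_alt matrix := by
  unfold magic_locs2 magic_locs2_alt
  by_cases hg : matrix = [] ∨ matrix.headD [] = []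
  · rw [if_pos hg]
    symm
    apply List.flatMap_eq_nil_iff.mpr
    intro r hr
    apply List.flatMap_eq_nil_iff.mpr
    intro q hq
    have hrmem : r.2 ∈ matrix := by
      rcases (PySem.List.mem_enumerate_iff _ _ _).mp hr with ⟨k, hk, rfl⟩
      exact List.getElem_mem _
    have hqmem : q.2 ∈ r.2 := by
      rcases (PySem.List.mem_enumerate_iff _ _ _).mp hq with ⟨k, hk, rfl⟩
      exact List.getElem_mem _
    have hno1 : (1 : Int) ∉ r.2 := by
      rcases hg with hg | hg
      · subst hg; cases hrmem
      · have := hpre r.2 hrmem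
        rw [hg] at this
        simpa using this
    rw [if_neg]
    rintro ⟨h1, -⟩
    exact hno1 (h1 ▸ hqmem)
  · rw [if_neg hg]
    have eo : PySem.List.enumerate matrix 0
        = (PySem.List.pyRange 0 (PySem.List.len matrix)).map
            (fun j => (j, PySem.List.pyGetD matrix j [])) :=
      PySem.List.enumerate_eq_map_pyRange matrix []
    have ei : ∀ xs : List Int, PySem.List.enumerate xs 0
        = (PySem.List.pyRange 0 (PySem.List.len xs)).map
            (fun j => (j, PySem.List.pyGetD xs j 0)) :=
      fun xs => PySem.List.enumerate_eq_map_pyRange xs 0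
    simp only [eo, ei, List.flatMap_map]
    -- name the counting state
    set rcA := (PySem.List.pyRange 0 (PySem.List.len matrix)).foldl
      (fun (rc : List Int × List Int) i =>
        (PySem.List.pyRange 0 (PySem.List.len (PySem.List.pyGetD matrix i []))).foldl
          (fun (rc : List Int × List Int) j =>
            if PySem.List.pyGetD (PySem.List.pyGetD matrix i []) j 0 = 1 then
              (PySem.List.pySetD rc.1 i (PySem.List.pyGetD rc.1 i 0 + 1),
               PySem.List.pySetD rc.2 j (PySem.List.pyGetD rc.2 j 0 + 1))
            else rc) rc)
      (List.replicate matrix.length (0 : Int), List.replicate (matrix.headD []).length (0 : Int))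
      with hrcA
    -- split the counting fold into its row and column components
    have hsplit : rcA
        = ((PySem.List.pyRange 0 (PySem.List.len matrix)).foldl
            (fun a i => PySem.List.pySetD a i (PySem.List.pyGetD a i 0
              + (PySem.List.count (PySem.List.pyGetD matrix i []) 1 : Int)))
            (List.replicate matrix.length (0 : Int)),
           (PySem.List.pyRange 0 (PySem.List.len matrix)).foldl
            (fun b i => (PySem.List.pyRange 0 (PySem.List.len (PySem.List.pyGetD matrix i []))).foldl
              (fun b j => if PySem.List.pyGetD (PySem.List.pyGetD matrix i []) j 0 = 1 then
                  PySem.List.pySetD b j (PySem.List.pyGetD b j 0 + 1) else b) b)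
            (List.replicate (matrix.headD []).length (0 : Int))) := by
      rw [hrcA]
      rw [PySem.List.foldl_congr_mem _ _
        (fun (rc : List Int × List Int) i =>
          (PySem.List.pySetD rc.1 i (PySem.List.pyGetD rc.1 i 0
            + (PySem.List.count (PySem.List.pyGetD matrix i []) 1 : Int)),
           (PySem.List.pyRange 0 (PySem.List.len (PySem.List.pyGetD matrix i []))).foldl
            (fun b j => if PySem.List.pyGetD (PySem.List.pyGetD matrix i []) j 0 = 1 then
                PySem.List.pySetD b j (PySem.List.pyGetD b j 0 + 1) else b) rc.2)) _ ?_]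
      · exact PySem.List.foldl_prod_mk
          (fun a i => PySem.List.pySetD a i (PySem.List.pyGetD a i 0
            + (PySem.List.count (PySem.List.pyGetD matrix i []) 1 : Int)))
          (fun b i => (PySem.List.pyRange 0 (PySem.List.len (PySem.List.pyGetD matrix i []))).foldl
            (fun b j => if PySem.List.pyGetD (PySem.List.pyGetD matrix i []) j 0 = 1 then
                PySem.List.pySetD b j (PySem.List.pyGetD b j 0 + 1) else b) b) _ _ _
      · rintro ⟨a, b⟩ i hi
        have hi0 : 0 ≤ i := ((PySem.List.mem_pyRange_one).mp hi).1
        rw [pv_foldl_prod_ite (fun j => PySem.List.pyGetD (PySem.List.pyGetD matrix i []) j 0 = 1)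
            (fun a j => PySem.List.pySetD a i (PySem.List.pyGetD a i 0 + 1))
            (fun b j => PySem.List.pySetD b j (PySem.List.pyGetD b j 0 + 1))]
        rw [pv_foldl_bump_fixed _ i hi0, pv_countP_pyRange_val]
    have hR : ∀ k : Int, 0 ≤ k → k < (matrix.length : Int) →
        PySem.List.pyGetD rcA.1 k 0 = (PySem.List.count (PySem.List.pyGetD matrix k []) 1 : Int) := by
      intro k hk hkn
      rw [hsplit]
      rw [pv_foldl_setD_add _ _ _ k hk (by
        intro x hx
        rw [PySem.List.mem_pyRange_one] at hx
        simp only [PySem.List.len_eq] at hx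
        simpa [List.length_replicate] using hx)]
      have hmem : k ∈ PySem.List.pyRange 0 (PySem.List.len matrix) := by
        rw [PySem.List.mem_pyRange_one]; simp only [PySem.List.len_eq]; exact ⟨hk, hkn⟩
      rw [pv_filter_eq_nodup _ k (PySem.List.nodup_pyRange_one _ _) hmem]
      rw [PySem.List.pyGetD_of_nonneg _ _ hk, List.getD_replicate 0 (by omega)]
      simp
    have hC : ∀ k : Int, 0 ≤ k →
        PySem.List.pyGetD rcA.2 k 0
          = (matrix.countP (fun row =>
              decide (k < PySem.List.len row ∧ PySem.List.pyGetD row k 0 = 1)) : Int) := by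
      intro k hk
      rw [hsplit]
      have hconv : (PySem.List.pyRange 0 (PySem.List.len matrix)).foldl
            (fun b i => (PySem.List.pyRange 0 (PySem.List.len (PySem.List.pyGetD matrix i []))).foldl
              (fun b j => if PySem.List.pyGetD (PySem.List.pyGetD matrix i []) j 0 = 1 then
                  PySem.List.pySetD b j (PySem.List.pyGetD b j 0 + 1) else b) b)
            (List.replicate (matrix.headD []).length (0 : Int))
          = matrix.foldl (fun b row => (PySem.List.pyRange 0 (PySem.List.len row)).foldl
              (fun b j => if PySem.List.pyGetD row j 0 = 1 then
                  PySem.List.pySetD b j (PySem.List.pyGetD b j 0 + 1) else b) b)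
            (List.replicate (matrix.headD []).length (0 : Int)) := by
        have hgen : ∀ (c0 : List Int),
            matrix.foldl (fun b row => (PySem.List.pyRange 0 (PySem.List.len row)).foldl
              (fun b j => if PySem.List.pyGetD row j 0 = 1 then
                  PySem.List.pySetD b j (PySem.List.pyGetD b j 0 + 1) else b) b) c0
            = (PySem.List.pyRange 0 (PySem.List.len matrix)).foldl
              (fun b i => (PySem.List.pyRange 0 (PySem.List.len (PySem.List.pyGetD matrix i []))).foldl
                (fun b j => if PySem.List.pyGetD (PySem.List.pyGetD matrix i []) j 0 = 1 then
                    PySem.List.pySetD b j (PySem.List.pyGetD b j 0 + 1) else b) b) c0 := by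
          intro c0
          conv_lhs => rw [← PySem.List.map_pyGetD_pyRange_zero matrix []]
          rw [List.foldl_map]
        exact (hgen _).symm
      rw [hconv, pv_colfold_char matrix _ k hk (by
        simpa [List.length_replicate] using hpre)]
      rw [PySem.List.pyGetD_of_nonneg _ _ hk]
      simp [List.getD_eq_getElem?_getD]
    -- phase 2
    simp only [PySem.List.foldl_append_ite, PySem.List.foldl_append_eq_flatMap, List.nil_append]
    rw [List.flatMap_def, List.flatMap_def]
    refine congrArg List.flatten (List.map_congr_left ?_)
    intro i hi
    have hi' := (PySem.List.mem_pyRange_one).mp hi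
    rw [pv_filter_map_eq_flatMap]
    rw [List.flatMap_def, List.flatMap_def]
    refine congrArg List.flatten (List.map_congr_left ?_)
    intro j hj
    have hj' := (PySem.List.mem_pyRange_one).mp hj
    by_cases hv : PySem.List.pyGetD (PySem.List.pyGetD matrix i []) j 0 = 1
    · have hri := hR i hi'.1 (by simpa [PySem.List.len_eq] using hi'.2)
      have hcj := hC j hj'.1
      have hBc : matrix.foldl (fun acc row =>
            if j < PySem.List.len row ∧ PySem.List.pyGetD row j 0 = 1 then acc + 1 else acc)
            (0 : Int)
          = (matrix.countP (fun row =>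
              decide (j < PySem.List.len row ∧ PySem.List.pyGetD row j 0 = 1)) : Int) := by
        rw [PySem.List.foldl_ite_add_one]; simp
      simp only [hv, hri, hcj, hBc, true_and, decide_eq_true_eq, Nat.cast_eq_one]
    · simp [hv]

-- ===== VERDICT (by name: the statement is the Claim_ definition above) =====
theorem magic_locs2_spec : Claim_equal_magic_locs2 := by
  intro matrix _dom hpre
  unfold Spec_magic_locs2
  unfold Pre_magic_locs2 at hpre
  exact pv_main matrix hpre
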